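-- pv_equiv track=rewrite | github.com/codeByKaustubh/Practicals-S4 | Theory of Computation/toc p7(1).py | is_equal_ones_zeroes
-- ===== SOURCE A (Python) =====
-- def is_equal_ones_zeroes(string):
--     count = 0
--
--     for char in string:
--         if char == '1':
--             count += 1
--         elif char == '0':
--             count -= 1
--         else:
--             return False
--
--     return count == 0
-- ===== SOURCE B (Python) =====
-- def is_equal_ones_zeroes(string):
--     if not set(string) <= {'0', '1'}:
--         return False
--     return string.count('1') == string.count('0')
-- ===== Notes on version B (the rewrite author's own statement) =====
-- stated objective: simpler
-- what changed: Replaces the single +1/-1 accumulating pass with early return by a validate-then-count decomposition: a set-subset alphabet check followed by two str.count passes compared for equality.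
import Mathlib
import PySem

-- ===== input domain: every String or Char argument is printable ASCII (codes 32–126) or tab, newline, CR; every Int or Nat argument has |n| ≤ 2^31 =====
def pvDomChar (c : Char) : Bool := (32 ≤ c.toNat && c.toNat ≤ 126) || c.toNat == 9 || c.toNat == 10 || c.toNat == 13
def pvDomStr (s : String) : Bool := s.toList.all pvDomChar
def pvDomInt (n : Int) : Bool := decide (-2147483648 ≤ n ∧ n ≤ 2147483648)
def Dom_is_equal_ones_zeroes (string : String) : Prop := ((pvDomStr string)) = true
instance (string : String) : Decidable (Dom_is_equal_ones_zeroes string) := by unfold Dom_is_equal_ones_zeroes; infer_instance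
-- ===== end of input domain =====

-- ===== PORT A =====
-- B replaces A's single accumulating pass (early return on a foreign char) by a
-- validate-then-count decomposition: alphabet subset check, then compare two counts.
def isEqLoopA : List Char → Int → Bool
  | [], count => count == 0
  | c :: rest, count =>
    if c = '1' then isEqLoopA rest (count + 1)
    else if c = '0' then isEqLoopA rest (count - 1)
    else false

def is_equal_ones_zeroes (string : String) : Bool :=
  isEqLoopA string.toList 0

-- ===== PORT B =====
def is_equal_ones_zeroes_alt (string : String) : Bool :=
  if PySem.Set.issubset (PySem.Set.ofList string.toList) ['0', '1'] then
    PySem.Str.count string "1" == PySem.Str.count string "0"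
  else
    false

-- ===== PRECONDITION & SPEC =====
def Spec_is_equal_ones_zeroes (string : String) (out : Bool) : Prop := out = is_equal_ones_zeroes_alt string
instance (string : String) (out : Bool) : Decidable (Spec_is_equal_ones_zeroes string out) := by unfold Spec_is_equal_ones_zeroes; infer_instance

-- ===== CLAIM =====
def Claim_equal_is_equal_ones_zeroes : Prop := ∀ (string : String), Dom_is_equal_ones_zeroes string → Spec_is_equal_ones_zeroes string (is_equal_ones_zeroes string)

-- ===== LEMMAS AND PROOFS =====

lemma count_go_singleton (c : Char) (fuel : Nat) (l : List Char) (acc : Nat)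
    (h : l.length ≤ fuel) :
    PySem.Chars.count.go [c] fuel l acc = acc + l.count c := by
  induction fuel generalizing l acc with
  | zero =>
    interval_cases hl : l.length
    · simp_all [List.length_eq_zero_iff.mp hl, PySem.Chars.count.go]
  | succ n ih =>
    cases l with
    | nil => simp [PySem.Chars.count.go]
    | cons hd t =>
      by_cases hc : hd = c
      · subst hc
        have : [hd].isPrefixOf (hd :: t) = true := by simp [List.isPrefixOf]
        simp only [PySem.Chars.count.go, this, if_true]
        simp only [List.length_cons, Nat.succ_le_succ_iff] at h
        rw [show List.drop [hd].length (hd :: t) = t by simp, ih t (acc + 1) h]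
        simp
        omega
      · have : [c].isPrefixOf (hd :: t) = false := by
          simp [List.isPrefixOf]
          exact fun e => absurd e.symm hc
        simp only [PySem.Chars.count.go, this]
        simp only [List.length_cons, Nat.succ_le_succ_iff] at h
        rw [if_neg (by simp), ih t acc h]
        simp [hc]

lemma count_singleton (cs : List Char) (c : Char) :
    PySem.Chars.count cs [c] = cs.count c := by
  have := count_go_singleton c cs.length cs 0 le_rfl
  simpa [PySem.Chars.count]

lemma loopA_eq (l : List Char) (count : Int) :
    isEqLoopA l count =
      if l.all (fun c => c == '0' || c == '1') then
        decide (count + (l.count '1' : Int) - (l.count '0' : Int) = 0)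
      else false := by
  induction l generalizing count with
  | nil =>
    simp only [isEqLoopA, List.all_nil, List.count_nil, if_true]
    rw [Bool.eq_iff_iff]
    simp
  | cons hd t ih =>
    by_cases h1 : hd = '1'
    · subst h1
      simp [isEqLoopA, ih]
      congr 1
      simp only [decide_eq_decide]
      omega
    · by_cases h0 : hd = '0'
      · subst h0
        simp [isEqLoopA, ih]
        congr 1
        simp only [decide_eq_decide]
        omega
      · simp [isEqLoopA, h1, h0]

-- ===== VERDICT =====
theorem is_equal_ones_zeroes_spec : Claim_equal_is_equal_ones_zeroes := by
  intro s _
  unfold Spec_is_equal_ones_zeroes is_equal_ones_zeroes is_equal_ones_zeroes_alt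
  rw [loopA_eq]
  rw [PySem.Str.count_eq, PySem.Str.count_eq]
  have hsub : PySem.Set.issubset (PySem.Set.ofList s.toList) ['0', '1'] =
      s.toList.all (fun c => c == '0' || c == '1') := by
    rw [Bool.eq_iff_iff, PySem.Set.issubset_iff, List.all_eq_true]
    constructor
    · intro h c hc
      have := h c (by simpa [PySem.Set.mem_ofList] using hc)
      simpa using this
    · intro h c hc
      have := h c (by simpa [PySem.Set.mem_ofList] using hc)
      simpa using this
  rw [hsub]
  split_ifs with h
  · show _ = (PySem.Chars.count s.toList "1".toList == PySem.Chars.count s.toList "0".toList)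
    have h1 : "1".toList = ['1'] := rfl
    have h0 : "0".toList = ['0'] := rfl
    rw [h1, h0, count_singleton, count_singleton]
    rw [Bool.eq_iff_iff, decide_eq_true_iff, beq_iff_eq]
    omega
  · rfl
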